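-- pv_equiv track=rewrite | github.com/roctbb/ai-game-engine | games/flood_escape/engine.py | _first_step_to_exit
-- ===== SOURCE A (Python) =====
-- _DELTAS = {
--     "up": (0, -1),
--     "down": (0, 1),
--     "left": (-1, 0),
--     "right": (1, 0),
--     "stay": (0, 0),
-- }
--
-- def _move(position: tuple[int, int], action: str) -> tuple[int, int]:
--     dx, dy = _DELTAS[action]
--     return position[0] + dx, position[1] + dy
--
-- def _first_step_to_exit(
--     start: tuple[int, int],
--     walls: set[tuple[int, int]],
--     water: set[tuple[int, int]],
--     exit_cell: tuple[int, int],
-- ) -> str | None: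
--     queue = [start]
--     came_from = {start: ("stay", start)}
--     head = 0
--     while head < len(queue):
--         current = queue[head]
--         head += 1
--         if current == exit_cell:
--             while came_from[current][1] != start:
--                 current = came_from[current][1]
--             return came_from[current][0]
--         for action in ("right", "down", "left", "up"):
--             nxt = _move(current, action)
--             if nxt in walls or nxt in water or nxt in came_from:
--                 continue
--             came_from[nxt] = (action, current)
--             queue.append(nxt)
--     return None
-- ===== SOURCE B (Python) =====
-- def _first_step_to_exit(
--     start: tuple[int, int],
--     walls: set[tuple[int, int]],
--     water: set[tuple[int, int]],
--     exit_cell: tuple[int, int],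
-- ) -> str | None:
--     # Same BFS frontier order, but each discovered cell stores the FIRST action
--     # taken out of `start` on its shortest path: no parent pointers, no backward
--     # path reconstruction at the end.
--     first_action = {start: "stay"}
--     queue = [start]
--     head = 0
--     while head < len(queue):
--         current = queue[head]
--         head += 1
--         step = first_action[current]
--         if current == exit_cell:
--             return step
--         x, y = current
--         for action, nxt in (
--             ("right", (x + 1, y)),
--             ("down", (x, y + 1)),
--             ("left", (x - 1, y)),
--             ("up", (x, y - 1)),
--         ):
--             if nxt in walls or nxt in water or nxt in first_action:
--                 continue
--             first_action[nxt] = action if current == start else step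
--             queue.append(nxt)
--     return None
-- ===== Notes on version B (the rewrite author's own statement) =====
-- stated objective: alternative
-- what changed: B's BFS stores, for each discovered cell, the first action taken from the start (inherited from its discoverer), so the answer is read off directly when the exit is dequeued - no parent-pointer dict and no backward path-reconstruction loop as in A.
import Mathlib
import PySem

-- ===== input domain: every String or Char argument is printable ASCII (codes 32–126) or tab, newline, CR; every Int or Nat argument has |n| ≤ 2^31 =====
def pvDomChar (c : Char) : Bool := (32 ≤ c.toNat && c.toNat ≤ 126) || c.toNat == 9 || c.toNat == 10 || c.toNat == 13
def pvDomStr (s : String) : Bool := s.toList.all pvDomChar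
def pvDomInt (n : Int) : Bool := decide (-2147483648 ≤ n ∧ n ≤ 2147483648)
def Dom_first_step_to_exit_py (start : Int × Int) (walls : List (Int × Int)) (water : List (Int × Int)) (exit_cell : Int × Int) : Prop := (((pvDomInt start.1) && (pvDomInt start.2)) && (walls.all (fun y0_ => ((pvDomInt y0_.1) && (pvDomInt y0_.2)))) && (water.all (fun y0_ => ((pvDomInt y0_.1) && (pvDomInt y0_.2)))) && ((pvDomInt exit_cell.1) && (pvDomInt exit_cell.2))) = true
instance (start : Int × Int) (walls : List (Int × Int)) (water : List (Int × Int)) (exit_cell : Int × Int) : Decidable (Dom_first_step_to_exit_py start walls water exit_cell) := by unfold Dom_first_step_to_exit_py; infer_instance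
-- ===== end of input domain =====

-- Note on the ports: the Python dicts came_from / first_action are only ever read
-- by key (never iterated), so the ports keep them in a Std.HashMap - the same
-- key -> value mapping, with an evaluation cost the differential tester can run.
-- B replaces A's parent-pointer dict + backward path reconstruction by a dict that
-- propagates each cell's FIRST action from the start (same BFS order, no final walk).

-- ===== PORT A =====
-- A's `_DELTAS` module dict and `_move` helper.
def fsDeltas : PySem.Dict String (Int × Int) :=
  PySem.Dict.ofList [("up", (0, -1)), ("down", (0, 1)), ("left", (-1, 0)), ("right", (1, 0)), ("stay", (0, 0))]

-- `_move` (the KeyError branch of `_DELTAS[action]` is unreachable: only literal action names are passed).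
def fsMove (position : Int × Int) (action : String) : Int × Int :=
  let d := fsDeltas.getD action (0, 0)
  (position.1 + d.1, position.2 + d.2)

-- A's inner `while came_from[current][1] != start` reconstruction loop; the fuel
-- (one more than the dict size) is a totality guard only — the parent chain is
-- strictly shorter than the dict.  `none` = the KeyError branch (unreachable).
def fsBacktrack (came : Std.HashMap (Int × Int) (String × (Int × Int))) (start : Int × Int) :
    Nat → (Int × Int) → Option String
  | 0, _ => none
  | f + 1, current =>
    match came[current]? with
    | none => none
    | some (a, p) => if p = start then some a else fsBacktrack came start f p

-- one iteration of A's `for action in ("right", "down", "left", "up")` body;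
-- the state is (front of the queue after `head`, rear of the queue reversed, came_from):
-- `queue.append` conses onto the reversed rear
def fsStepA (walls water : List (Int × Int)) (current : Int × Int)
    (st : List (Int × Int) × List (Int × Int) × Std.HashMap (Int × Int) (String × (Int × Int)))
    (action : String) :
    List (Int × Int) × List (Int × Int) × Std.HashMap (Int × Int) (String × (Int × Int)) :=
  let nxt := fsMove current action
  if walls.contains nxt || water.contains nxt || st.2.2[nxt]?.isSome then st
  else (st.1, nxt :: st.2.1, st.2.2.insert nxt (action, current))

-- A's outer `while head < len(queue)` loop.  `queue[head:]` is modelled by the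
-- standard two-list FIFO (front ++ back.reverse): same cells, same order, same
-- dequeues.  The Nat fuel is a totality guard only.
def fsLoopA (walls water : List (Int × Int)) (start exit_cell : Int × Int) :
    Nat → List (Int × Int) → List (Int × Int) →
      Std.HashMap (Int × Int) (String × (Int × Int)) → Option String
  | 0, _, _, _ => none
  | f + 1, front, back, came =>
    match (if front.isEmpty then back.reverse else front) with
    | [] => none
    | current :: rest =>
      if current = exit_cell then fsBacktrack came start (came.size + 1) current
      else
        let back' := if front.isEmpty then [] else back
        let st := ["right", "down", "left", "up"].foldl (fsStepA walls water current)
          (rest, back', came)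
        fsLoopA walls water start exit_cell f st.1 st.2.1 st.2.2

-- fuel for the BFS loops: when A terminates it dequeues at most this many cells
-- (all visited cells lie within BFS distance (manhattan + detour bound) of start)
def fsFuel (start : Int × Int) (walls water : List (Int × Int)) (exit_cell : Int × Int) : Nat :=
  let w := walls.length + water.length
  let man := (start.1 - exit_cell.1).natAbs + (start.2 - exit_cell.2).natAbs
  (2 * (man + 8 * (w + 2) ^ 2) + 5) ^ 2 + 2

def first_step_to_exit_py (start : Int × Int) (walls : List (Int × Int)) (water : List (Int × Int)) (exit_cell : Int × Int) : Option String :=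
  fsLoopA walls water start exit_cell (fsFuel start walls water exit_cell)
    [start] [] ((∅ : Std.HashMap (Int × Int) (String × (Int × Int))).insert start ("stay", start))

-- ===== PORT B =====
-- one iteration of B's neighbour loop (an = (action, nxt)); queue modelled by the
-- same two-list FIFO as in port A
def fbStep (walls water : List (Int × Int)) (start current : Int × Int) (step : String)
    (st : List (Int × Int) × List (Int × Int) × Std.HashMap (Int × Int) String)
    (an : String × (Int × Int)) :
    List (Int × Int) × List (Int × Int) × Std.HashMap (Int × Int) String :=
  if walls.contains an.2 || water.contains an.2 || st.2.2[an.2]?.isSome then st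
  else (st.1, an.2 :: st.2.1, st.2.2.insert an.2 (if current = start then an.1 else step))

-- B's `while head < len(queue)` loop; `none` at the `first_action[current]`
-- lookup is the (unreachable) KeyError branch.
def fbLoop (walls water : List (Int × Int)) (start exit_cell : Int × Int) :
    Nat → List (Int × Int) → List (Int × Int) → Std.HashMap (Int × Int) String → Option String
  | 0, _, _, _ => none
  | f + 1, front, back, fa =>
    match (if front.isEmpty then back.reverse else front) with
    | [] => none
    | current :: rest =>
      match fa[current]? with
      | none => none
      | some step =>
        if current = exit_cell then some step
        else
          let back' := if front.isEmpty then [] else back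
          let st := [("right", (current.1 + 1, current.2)), ("down", (current.1, current.2 + 1)),
                     ("left", (current.1 - 1, current.2)), ("up", (current.1, current.2 - 1))].foldl
                    (fbStep walls water start current step) (rest, back', fa)
          fbLoop walls water start exit_cell f st.1 st.2.1 st.2.2

def first_step_to_exit_py_alt (start : Int × Int) (walls : List (Int × Int)) (water : List (Int × Int)) (exit_cell : Int × Int) : Option String :=
  fbLoop walls water start exit_cell (fsFuel start walls water exit_cell)
    [start] [] ((∅ : Std.HashMap (Int × Int) String).insert start "stay")

-- ===== PRECONDITION & SPEC =====
-- helpers deciding whether A's BFS terminates: the free component of a seed cell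
-- is infinite iff the exploration reaches a cell with an obstacle-free axis ray
def fsEscapes (obs : List (Int × Int)) (c : Int × Int) : Bool :=
  (obs.all fun o => !(o.2 == c.2 && c.1 < o.1)) || (obs.all fun o => !(o.2 == c.2 && o.1 < c.1)) ||
  (obs.all fun o => !(o.1 == c.1 && c.2 < o.2)) || (obs.all fun o => !(o.1 == c.1 && o.2 < c.2))

def fsNbrs (c : Int × Int) : List (Int × Int) :=
  [(c.1 + 1, c.2), (c.1, c.2 + 1), (c.1 - 1, c.2), (c.1, c.2 - 1)]

-- (infinite?, visited) of the free component of the seed; fuel (w+2)^2 bounds the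
-- rounds: at most w^2 cells lack an escaping ray, so exploration stops before it runs out
def fsComp (obs : List (Int × Int)) : Nat → List (Int × Int) → List (Int × Int) → Bool × List (Int × Int)
  | 0, vis, _ => (true, vis)
  | f + 1, vis, fr =>
    if fr.any (fsEscapes obs) then (true, vis)
    else
      let st := fr.foldl (fun (st : List (Int × Int) × List (Int × Int)) c =>
          (fsNbrs c).foldl (fun (st : List (Int × Int) × List (Int × Int)) n =>
            if obs.contains n || st.1.contains n then st else (st.1 ++ [n], st.2 ++ [n])) st)
        (vis, [])
      if st.2.isEmpty then (false, st.1) else fsComp obs f st.1 st.2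

-- true iff A's BFS terminates: the exit is reachable from start, or start's free
-- component is finite (then the queue empties)
def fsTerminates (start : Int × Int) (walls water : List (Int × Int)) (exit_cell : Int × Int) : Bool :=
  let obs := walls ++ water
  if start = exit_cell then true
  else if (fsComp obs ((obs.length + 2) ^ 2) [start] [start]).1 = false then true
  else if obs.contains exit_cell then false
  else
    let ce := fsComp obs ((obs.length + 2) ^ 2) [exit_cell] [exit_cell]
    ce.1 || (fsNbrs start).any fun n => ce.2.contains n

-- Pre_ holds exactly when the Python A RETURNS: outside it A's BFS runs forever
-- (the exit is unreachable and start's free region is infinite), returning nothing.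
def Pre_first_step_to_exit_py (start : Int × Int) (walls : List (Int × Int)) (water : List (Int × Int)) (exit_cell : Int × Int) : Prop :=
  fsTerminates start walls water exit_cell = true
instance (start : Int × Int) (walls : List (Int × Int)) (water : List (Int × Int)) (exit_cell : Int × Int) : Decidable (Pre_first_step_to_exit_py start walls water exit_cell) := by unfold Pre_first_step_to_exit_py; infer_instance

def pvWitness_first_step_to_exit_py : (Int × Int) × (List (Int × Int)) × (List (Int × Int)) × (Int × Int) :=
  ((0, 0), [(1, 0)], [], (2, 2))

def Spec_first_step_to_exit_py (start : Int × Int) (walls : List (Int × Int)) (water : List (Int × Int)) (exit_cell : Int × Int) (out : Option String) : Prop := out = first_step_to_exit_py_alt start walls water exit_cell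
instance (start : Int × Int) (walls : List (Int × Int)) (water : List (Int × Int)) (exit_cell : Int × Int) (out : Option String) : Decidable (Spec_first_step_to_exit_py start walls water exit_cell out) := by unfold Spec_first_step_to_exit_py; infer_instance

-- ===== CLAIM (what is proved, stated in full; the proofs are below) =====
def Claim_equal_first_step_to_exit_py : Prop := ∀ (start : Int × Int) (walls : List (Int × Int)) (water : List (Int × Int)) (exit_cell : Int × Int), Dom_first_step_to_exit_py start walls water exit_cell → Pre_first_step_to_exit_py start walls water exit_cell → Spec_first_step_to_exit_py start walls water exit_cell (first_step_to_exit_py start walls water exit_cell)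

-- ===== LEMMAS AND PROOFS =====

-- the bisimulation invariant: both dicts have the same keys, and chasing A's
-- parent chain from any key yields exactly B's stored first action for it
def fsInv (start : Int × Int) (came : Std.HashMap (Int × Int) (String × (Int × Int)))
    (fa : Std.HashMap (Int × Int) String) : Prop :=
  (∀ c : Int × Int, came[c]?.isSome ↔ fa[c]?.isSome) ∧
  (∀ (c : Int × Int) (s : String), fa[c]? = some s →
    fsBacktrack came start (came.size + 1) c = some s)

theorem hmGet_insert {ν : Type} (m : Std.HashMap (Int × Int) ν) (k a : Int × Int) (v : ν) :
    (m.insert k v)[a]? = if a = k then some v else m[a]? := by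
  rw [Std.HashMap.getElem?_insert]
  by_cases h : a = k
  · rw [if_pos (by simpa [beq_iff_eq] using h.symm), if_pos h]
  · rw [if_neg (by simp only [beq_iff_eq]; exact fun e => h e.symm), if_neg h]

theorem hmSize_insert_fresh {ν : Type} (m : Std.HashMap (Int × Int) ν) (k : Int × Int) (v : ν)
    (h : m[k]? = none) : (m.insert k v).size = m.size + 1 := by
  rw [Std.HashMap.size_insert, if_neg]
  rw [Std.HashMap.mem_iff_contains, Std.HashMap.contains_eq_isSome_getElem?, h]
  simp

theorem fsBacktrack_mono_insert (came : Std.HashMap (Int × Int) (String × (Int × Int)))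
    (start k : Int × Int) (v : String × (Int × Int)) (hk : came[k]? = none) :
    ∀ f f' c s, f ≤ f' → fsBacktrack came start f c = some s →
      fsBacktrack (came.insert k v) start f' c = some s := by
  intro f
  induction f with
  | zero => intro f' c s _ h; simp [fsBacktrack] at h
  | succ f ih =>
    intro f' c s hle h
    obtain ⟨g, rfl⟩ : ∃ g, f' = g + 1 := ⟨f' - 1, by omega⟩
    rw [fsBacktrack] at h
    cases hc : came[c]? with
    | none => rw [hc] at h; simp at h
    | some ap =>
      rw [hc] at h
      have hne : c ≠ k := by intro he; rw [he, hk] at hc; exact absurd hc (by simp)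
      rw [fsBacktrack, hmGet_insert, if_neg hne, hc]
      obtain ⟨a, p⟩ := ap
      simp only at h ⊢
      by_cases hp : p = start
      · simpa [hp] using h
      · rw [if_neg hp] at h ⊢
        exact ih g p s (by omega) h

-- what one neighbour step must preserve: equal queue halves, the invariant,
-- every queued cell a key, and the dequeued cell's stored first action
def fsStateOK (start current : Int × Int) (stepv : String)
    (sa : List (Int × Int) × List (Int × Int) × Std.HashMap (Int × Int) (String × (Int × Int)))
    (sb : List (Int × Int) × List (Int × Int) × Std.HashMap (Int × Int) String) : Prop :=
  sa.1 = sb.1 ∧ sa.2.1 = sb.2.1 ∧ fsInv start sa.2.2 sb.2.2 ∧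
    (∀ c ∈ sb.1, (sb.2.2[c]?).isSome) ∧ (∀ c ∈ sb.2.1, (sb.2.2[c]?).isSome) ∧
    sb.2.2[current]? = some stepv

theorem fsMove_right (c : Int × Int) : fsMove c "right" = (c.1 + 1, c.2) := by
  have h : fsDeltas.getD "right" (0, 0) = (1, 0) := by decide
  simp [fsMove, h]

theorem fsMove_down (c : Int × Int) : fsMove c "down" = (c.1, c.2 + 1) := by
  have h : fsDeltas.getD "down" (0, 0) = (0, 1) := by decide
  simp [fsMove, h]

theorem fsMove_left (c : Int × Int) : fsMove c "left" = (c.1 - 1, c.2) := by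
  have h : fsDeltas.getD "left" (0, 0) = (-1, 0) := by decide
  simp [fsMove, h, Int.sub_eq_add_neg]

theorem fsMove_up (c : Int × Int) : fsMove c "up" = (c.1, c.2 - 1) := by
  have h : fsDeltas.getD "up" (0, 0) = (0, -1) := by decide
  simp [fsMove, h, Int.sub_eq_add_neg]

theorem fsStep_pair (walls water : List (Int × Int)) (start current : Int × Int) (stepv : String)
    (action : String) (nxt : Int × Int) (hmv : fsMove current action = nxt)
    (sa : List (Int × Int) × List (Int × Int) × Std.HashMap (Int × Int) (String × (Int × Int)))
    (sb : List (Int × Int) × List (Int × Int) × Std.HashMap (Int × Int) String)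
    (h : fsStateOK start current stepv sa sb) :
    fsStateOK start current stepv (fsStepA walls water current sa action)
      (fbStep walls water start current stepv sb (action, nxt)) := by
  obtain ⟨hq, hb, ⟨hiso, hbt⟩, hqk, hbk, hcur⟩ := h
  have hbool : sa.2.2[nxt]?.isSome = sb.2.2[nxt]?.isSome := by
    have h := hiso nxt
    revert h; cases sa.2.2[nxt]?.isSome <;> cases sb.2.2[nxt]?.isSome <;> simp
  unfold fsStepA fbStep
  rw [hmv]
  simp only [hbool]
  by_cases hg : (walls.contains nxt || water.contains nxt || sb.2.2[nxt]?.isSome) = true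
  · rw [if_pos hg, if_pos hg]
    exact ⟨hq, hb, ⟨hiso, hbt⟩, hqk, hbk, hcur⟩
  · rw [if_neg hg, if_neg hg]
    -- fresh key nxt is inserted in both dicts
    have hnb : sb.2.2[nxt]? = none := by
      rcases Bool.or_eq_false_iff.mp (Bool.eq_false_iff.mpr hg) with ⟨-, h2⟩
      exact Option.not_isSome_iff_eq_none.mp (by simp [h2])
    have hna : sa.2.2[nxt]? = none := by
      apply Option.not_isSome_iff_eq_none.mp
      rw [hbool, hnb]; simp
    have hsz : (sa.2.2.insert nxt (action, current)).size = sa.2.2.size + 1 :=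
      hmSize_insert_fresh _ _ _ hna
    have hcne : current ≠ nxt := by
      intro he; rw [← he, hcur] at hnb; exact absurd hnb (by simp)
    refine ⟨hq, by simp [hb], ⟨?_, ?_⟩, ?_, ?_, ?_⟩
    · intro c
      by_cases hc : c = nxt
      · simp only [hmGet_insert, if_pos hc]; simp
      · simp only [hmGet_insert, if_neg hc]
        exact hiso c
    · intro c s hc
      rw [hmGet_insert] at hc
      rw [hsz]
      by_cases hcn : c = nxt
      · rw [if_pos hcn] at hc
        subst hcn
        obtain rfl : (if current = start then action else stepv) = s := by
          simpa using hc
        show fsBacktrack _ start (sa.2.2.size + 1 + 1) c = _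
        rw [fsBacktrack, hmGet_insert, if_pos rfl]
        simp only
        by_cases hps : current = start
        · simp [hps]
        · rw [if_neg hps, if_neg hps]
          exact fsBacktrack_mono_insert sa.2.2 start c (action, current) hna
            (sa.2.2.size + 1) (sa.2.2.size + 1) current stepv le_rfl (hbt current stepv hcur)
      · rw [if_neg hcn] at hc
        exact fsBacktrack_mono_insert sa.2.2 start nxt (action, current) hna
          (sa.2.2.size + 1) (sa.2.2.size + 1 + 1) c s (by omega) (hbt c s hc)
    · intro c hcmem
      by_cases hc : c = nxt
      · simp only [hmGet_insert, if_pos hc]; simp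
      · simp only [hmGet_insert, if_neg hc]
        exact hqk c hcmem
    · intro c hcmem
      rcases List.mem_cons.mp hcmem with hcm | hcm
      · simp only [hmGet_insert, if_pos hcm]; simp
      · by_cases hc : c = nxt
        · simp only [hmGet_insert, if_pos hc]; simp
        · simp only [hmGet_insert, if_neg hc]
          exact hbk c hcm
    · rw [hmGet_insert, if_neg hcne, hcur]

theorem fsLoop_eq (walls water : List (Int × Int)) (start exit_cell : Int × Int) :
    ∀ (f : Nat) (front back : List (Int × Int)) came fa,
      fsInv start came fa → (∀ c ∈ front, fa[c]?.isSome) → (∀ c ∈ back, fa[c]?.isSome) →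
      fsLoopA walls water start exit_cell f front back came =
        fbLoop walls water start exit_cell f front back fa := by
  intro f
  induction f with
  | zero => intro front back came fa _ _ _; rfl
  | succ f ih =>
    intro front back came fa hinv hfr hbk
    rw [fsLoopA, fbLoop]
    have hpend : ∀ c ∈ (if front.isEmpty then back.reverse else front), fa[c]?.isSome := by
      intro c hc
      by_cases hf : front.isEmpty
      · exact hbk c (List.mem_reverse.mp (by simpa [hf] using hc))
      · exact hfr c (by simpa [hf] using hc)
    cases hp : (if front.isEmpty then back.reverse else front) with
    | nil => rfl
    | cons current rest =>
      obtain ⟨stepv, hcur⟩ := Option.isSome_iff_exists.mp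
        (hpend current (by rw [hp]; exact List.mem_cons_self))
      simp only [hcur]
      by_cases he : current = exit_cell
      · rw [if_pos he, if_pos he]
        exact hinv.2 current stepv hcur
      · rw [if_neg he, if_neg he]
        simp only [List.foldl]
        have hbk' : ∀ c ∈ (if front.isEmpty then ([] : List (Int × Int)) else back),
            fa[c]?.isSome := by
          intro c hc
          by_cases hf : front.isEmpty
          · simp [hf] at hc
          · exact hbk c (by simpa [hf] using hc)
        have h0 : fsStateOK start current stepv
            (rest, (if front.isEmpty then [] else back), came)
            (rest, (if front.isEmpty then [] else back), fa) :=
          ⟨rfl, rfl, hinv,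
            fun c hc => hpend c (by rw [hp]; exact List.mem_cons_of_mem _ hc), hbk', hcur⟩
        have h1 := fsStep_pair walls water start current stepv "right" (current.1 + 1, current.2)
          (fsMove_right current) _ _ h0
        have h2 := fsStep_pair walls water start current stepv "down" (current.1, current.2 + 1)
          (fsMove_down current) _ _ h1
        have h3 := fsStep_pair walls water start current stepv "left" (current.1 - 1, current.2)
          (fsMove_left current) _ _ h2
        have h4 := fsStep_pair walls water start current stepv "up" (current.1, current.2 - 1)
          (fsMove_up current) _ _ h3
        obtain ⟨hq, hb, hinv', hq', hb', -⟩ := h4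
        rw [hq, hb]
        exact ih _ _ _ _ hinv' hq' hb'

-- ===== VERDICT (by name: the statement is the Claim_ definition above) =====
theorem first_step_to_exit_py_spec : Claim_equal_first_step_to_exit_py := by
  intro start walls water exit_cell _ _
  unfold Spec_first_step_to_exit_py first_step_to_exit_py first_step_to_exit_py_alt
  apply fsLoop_eq
  · constructor
    · intro c
      rw [hmGet_insert, hmGet_insert]
      by_cases hc : c = start
      · rw [if_pos hc, if_pos hc]; simp
      · rw [if_neg hc, if_neg hc, Std.HashMap.getElem?_empty, Std.HashMap.getElem?_empty]; simp
    · intro c s hc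
      rw [hmGet_insert] at hc
      by_cases hcs : c = start
      · obtain rfl : s = "stay" := (Option.some.inj (by rwa [if_pos hcs] at hc)).symm
        subst hcs
        rw [show ((∅ : Std.HashMap (Int × Int) (String × (Int × Int))).insert c
              ("stay", c)).size + 1 = 2 by
            rw [hmSize_insert_fresh _ _ _ Std.HashMap.getElem?_empty, Std.HashMap.size_empty]]
        rw [fsBacktrack, hmGet_insert, if_pos rfl]
        simp
      · rw [if_neg hcs, Std.HashMap.getElem?_empty] at hc
        exact absurd hc (by simp)
  · intro c hc
    obtain rfl : c = start := List.mem_singleton.mp hc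
    rw [hmGet_insert, if_pos rfl]
    simp
  · intro c hc
    simp at hc
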